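-- pv_equiv track=rewrite | github.com/deep-type/deeptype2 | code/extraction/count_dataset_tokens.py | count_different
-- ===== SOURCE A (Python) =====
-- def count_different(seq):
--     prev = None
--     tot = 0
--     for el in seq:
--         if (prev is None or el != prev) and el != '':
--             tot += 1
--         prev = el
--     return tot
-- ===== SOURCE B (Python) =====
-- def count_different(seq):
--     seq = list(seq)
--     nonempty = sum(1 for el in seq if el != '')
--     repeats = sum(1 for a, b in zip(seq, seq[1:]) if a == b and b != '')
--     return nonempty - repeats
-- ===== Notes on version B (the rewrite author's own statement) =====
-- stated objective: alternative
-- what changed: Replaces A's stateful prev/sentinel run-tracking loop with an arithmetic identity: the count equals the number of non-empty elements minus the number of adjacent pairs repeating a non-empty value, computed as two independent stateless counts.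
import Mathlib
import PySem

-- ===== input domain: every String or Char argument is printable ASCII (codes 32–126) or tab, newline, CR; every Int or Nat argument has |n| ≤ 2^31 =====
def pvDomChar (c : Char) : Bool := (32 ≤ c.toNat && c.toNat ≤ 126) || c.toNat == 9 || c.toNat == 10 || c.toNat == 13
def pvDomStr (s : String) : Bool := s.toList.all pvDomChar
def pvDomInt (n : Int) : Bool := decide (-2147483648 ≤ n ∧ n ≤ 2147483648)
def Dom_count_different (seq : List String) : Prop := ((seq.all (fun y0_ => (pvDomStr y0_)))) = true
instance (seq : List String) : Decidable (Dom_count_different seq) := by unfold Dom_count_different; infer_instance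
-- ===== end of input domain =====

-- B replaces A's stateful prev-tracking loop by an arithmetic identity: answer =
-- (# non-empty elements) - (# adjacent pairs repeating a non-empty value); objective: alternative.

-- ===== PORT A =====
-- A: fold over seq carrying (prev, tot), prev starts as None.
def count_different (seq : List String) : Int :=
  (seq.foldl
    (fun (st : Option String × Int) el =>
      ( some el,
        if (st.1 = none ∨ st.1 ≠ some el) ∧ el ≠ "" then st.2 + 1 else st.2))
    (none, 0)).2

-- ===== PORT B =====
-- two independent stateless counts: non-empty elements, and adjacent equal non-empty pairs.
def count_different_alt (seq : List String) : Int :=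
  ((seq.filter (fun el => el ≠ "")).length : Int)
    - (((List.zip seq (seq.drop 1)).filter (fun p => p.1 = p.2 ∧ p.2 ≠ "")).length : Int)

-- ===== PRECONDITION & SPEC =====
def Spec_count_different (seq : List String) (out : Int) : Prop := out = count_different_alt seq
instance (seq : List String) (out : Int) : Decidable (Spec_count_different seq out) := by unfold Spec_count_different; infer_instance

-- ===== CLAIM =====
def Claim_equal_count_different : Prop := ∀ (seq : List String), Dom_count_different seq → Spec_count_different seq (count_different seq)

-- ===== LEMMAS AND PROOFS =====

-- A's loop as explicit recursion (proof helper, mirrors the foldl step).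
def aLoop : Option String → Int → List String → Int
  | _, tot, [] => tot
  | prev, tot, el :: rest =>
      aLoop (some el)
        (if (prev = none ∨ prev ≠ some el) ∧ el ≠ "" then tot + 1 else tot) rest

theorem foldl_eq_aLoop (seq : List String) (prev : Option String) (tot : Int) :
    (seq.foldl
      (fun (st : Option String × Int) el =>
        ( some el,
          if (st.1 = none ∨ st.1 ≠ some el) ∧ el ≠ "" then st.2 + 1 else st.2))
      (prev, tot)).2 = aLoop prev tot seq := by
  induction seq generalizing prev tot with
  | nil => rfl
  | cons el rest ih => simp [List.foldl, aLoop, ih]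

theorem aLoop_shift (seq : List String) (prev : Option String) (tot : Int) :
    aLoop prev tot seq = tot + aLoop prev 0 seq := by
  induction seq generalizing prev tot with
  | nil => simp [aLoop]
  | cons el rest ih =>
      simp only [aLoop]
      rw [ih]
      conv_rhs => rw [ih]
      split <;> ring

-- repeats relative to a previous value, recursively (proof helper)
def rep : String → List String → Int
  | _, [] => 0
  | p, x :: rest => (if x = p ∧ x ≠ "" then (1 : Int) else 0) + rep x rest

theorem aLoop_some_eq (seq : List String) (p : String) :
    aLoop (some p) 0 seq = ((seq.filter (fun el => el ≠ "")).length : Int) - rep p seq := by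
  induction seq generalizing p with
  | cons x rest ih =>
      simp only [aLoop, rep]
      rw [aLoop_shift, ih]
      by_cases hxp : x = p
      · subst hxp
        by_cases hx : x = "" <;> simp [hx, List.filter_cons] <;> push_cast <;> ring
      · have hpx : ¬ p = x := fun h => hxp h.symm
        by_cases hx : x = "" <;>
          simp [hx, hxp, hpx, List.filter_cons] <;> push_cast <;> ring
  | nil => simp [aLoop, rep]

theorem zip_rep (x : String) (rest : List String) :
    (((List.zip (x :: rest) rest).filter (fun p => p.1 = p.2 ∧ p.2 ≠ "")).length : Int)
      = rep x rest := by
  induction rest generalizing x with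
  | nil => simp [rep]
  | cons y rs ih =>
      rw [List.zip_cons_cons, List.filter_cons]
      simp only [rep]
      rw [← ih y]
      by_cases h : x = y ∧ y ≠ ""
      · obtain ⟨rfl, hy⟩ := h
        simp [hy]
        push_cast
        ring
      · have h' : ¬ (y = x ∧ ¬ y = "") := fun hc => h ⟨hc.1.symm, hc.2⟩
        simp [h, h']

-- ===== VERDICT =====
theorem count_different_spec : Claim_equal_count_different := by
  intro seq _
  unfold Spec_count_different count_different count_different_alt
  rw [foldl_eq_aLoop]
  cases seq with
  | nil => simp [aLoop]
  | cons x rest =>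
      simp only [aLoop, List.drop_one, List.tail_cons]
      rw [aLoop_shift, aLoop_some_eq, zip_rep]
      by_cases hx : x = "" <;> simp [hx, List.filter] <;> push_cast <;> ring
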